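-- pv_equiv track=rewrite | github.com/chunjiw/leetcode | problems/2097 Valid Arrangement of Pairs/validArrangement_BFS.py | noDuplicates
-- ===== SOURCE A (Python) =====
-- def noDuplicates(seq):
--     s = set()
--     valid = True
--     for i in range(len(seq) - 1):
--         if (seq[i], seq[i+1]) in s:
--             return False
--         else:
--             s.add((seq[i], seq[i+1]))
--     return True
-- ===== SOURCE B (Python) =====
-- def noDuplicates(seq):
--     pairs = sorted(zip(seq, seq[1:]))
--     return all(p != q for p, q in zip(pairs, pairs[1:]))
-- ===== Notes on version B (the rewrite author's own statement) =====
-- stated objective: alternative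
-- what changed: Replaces A's incremental hash-set scan with early exit by sorting the adjacent-pair list and checking that no two consecutive sorted pairs are equal (sort-based duplicate detection instead of a seen-set).
import Mathlib
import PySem

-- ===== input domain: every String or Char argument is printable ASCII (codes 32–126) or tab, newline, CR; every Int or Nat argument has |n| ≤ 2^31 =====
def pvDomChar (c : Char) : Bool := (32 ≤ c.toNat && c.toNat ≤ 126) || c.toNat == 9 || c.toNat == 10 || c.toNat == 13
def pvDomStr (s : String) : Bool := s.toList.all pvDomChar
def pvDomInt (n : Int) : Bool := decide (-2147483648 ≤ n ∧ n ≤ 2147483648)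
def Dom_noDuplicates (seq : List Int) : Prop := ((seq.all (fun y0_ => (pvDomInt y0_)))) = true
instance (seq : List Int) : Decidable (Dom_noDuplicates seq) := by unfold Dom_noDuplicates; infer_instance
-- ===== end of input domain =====

-- B replaces A's seen-set with early exit by sorting the adjacent-pair list and
-- checking consecutive sorted pairs for equality (objective: alternative algorithm).

-- ===== PORT A =====
-- the loop 'for i in range(len(seq)-1)' with early 'return False'
def noDuplicatesGo (seq : List Int) : List Int → PySem.Set (Int × Int) → Bool
  | [], _ => true
  | i :: rest, s =>
    -- seq[i] / seq[i+1]: i is drawn from range(len(seq)-1), always in range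
    let p := (PySem.List.pyGetD seq i 0, PySem.List.pyGetD seq (i + 1) 0)
    if PySem.Set.contains s p then false
    else noDuplicatesGo seq rest (PySem.Set.add s p)

def noDuplicates (seq : List Int) : Bool :=
  noDuplicatesGo seq (PySem.List.pyRange 0 ((seq.length : Int) - 1) 1) PySem.Set.empty

-- ===== PORT B =====
def noDuplicates_alt (seq : List Int) : Bool :=
  let pairs := seq.zip (PySem.List.slice seq (some 1) none)
  let sp := PySem.List.sorted2 pairs (fun p => p.1) (fun p => p.2)
  (sp.zip (PySem.List.slice sp (some 1) none)).all (fun pq => pq.1 != pq.2)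

-- ===== PRECONDITION & SPEC =====
def Spec_noDuplicates (seq : List Int) (out : Bool) : Prop := out = noDuplicates_alt seq
instance (seq : List Int) (out : Bool) : Decidable (Spec_noDuplicates seq out) := by unfold Spec_noDuplicates; infer_instance

-- ===== CLAIM (what is proved, stated in full; the proofs are below) =====
def Claim_equal_noDuplicates : Prop := ∀ (seq : List Int), Dom_noDuplicates seq → Spec_noDuplicates seq (noDuplicates seq)

-- ===== LEMMAS AND PROOFS =====

-- A's loop, reformulated over the list of pairs it inspects
def pairsLoop : List (Int × Int) → PySem.Set (Int × Int) → Bool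
  | [], _ => true
  | p :: ps, s => if PySem.Set.contains s p then false else pairsLoop ps (PySem.Set.add s p)

theorem go_eq_pairsLoop (seq : List Int) (idxs : List Int) (s : PySem.Set (Int × Int)) :
    noDuplicatesGo seq idxs s =
      pairsLoop (idxs.map (fun i => (PySem.List.pyGetD seq i 0, PySem.List.pyGetD seq (i + 1) 0))) s := by
  induction idxs generalizing s with
  | nil => rfl
  | cons i rest ih => simp [noDuplicatesGo, pairsLoop, ih]

theorem map_range_eq_zip (xs : List Int) :
    (PySem.List.pyRange 0 ((xs.length : Int) - 1) 1).map
        (fun i => (PySem.List.pyGetD xs i 0, PySem.List.pyGetD xs (i + 1) 0)) =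
      xs.zip xs.tail := by
  apply List.ext_getElem
  · simp [PySem.List.length_pyRange_one]
  · intro j h1 h2
    simp only [List.getElem_map, PySem.List.getElem_pyRange_one, zero_add]
    simp only [List.length_map, PySem.List.length_pyRange_one] at h1
    have hj2 : j + 1 < xs.length := by omega
    have hj1 : j < xs.length := by omega
    have e1 : PySem.List.pyGetD xs (j : Int) 0 = xs[j] := by
      rw [PySem.List.pyGetD_natCast]
      exact List.getD_eq_getElem xs 0 hj1
    have e2 : PySem.List.pyGetD xs ((j : Int) + 1) 0 = xs[j + 1] := by
      have hcast : ((j : Int) + 1) = ((j + 1 : Nat) : Int) := by push_cast; ring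
      rw [hcast, PySem.List.pyGetD_natCast]
      exact List.getD_eq_getElem xs 0 hj2
    simp [e1, e2, List.getElem_zip, List.getElem_tail]

-- A's loop returns True exactly when the pairs are distinct and none was pre-seeded
theorem pairsLoop_iff (ps : List (Int × Int)) (s : PySem.Set (Int × Int)) :
    pairsLoop ps s = true ↔ ps.Nodup ∧ ∀ p ∈ ps, p ∉ s := by
  induction ps generalizing s with
  | nil => simp [pairsLoop]
  | cons p ps ih =>
    by_cases hm : p ∈ s
    · have hc : PySem.Set.contains s p = true := by simpa [PySem.Set.contains] using hm
      simp only [pairsLoop, hc, if_true, Bool.false_eq_true, false_iff, not_and]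
      intro _ hall
      exact (hall p List.mem_cons_self) hm
    · have hc : PySem.Set.contains s p = false := by simpa [PySem.Set.contains] using hm
      have hadd : PySem.Set.add s p = s ++ [p] := by simp [PySem.Set.add, hm]
      simp only [pairsLoop, hc, Bool.false_eq_true, if_false, hadd, ih, List.nodup_cons,
        List.mem_cons]
      have key : ∀ q : Int × Int, q ∉ s ++ [p] ↔ q ∉ s ∧ q ≠ p := by
        intro q; simp [List.mem_append, not_or]
      constructor
      · rintro ⟨hnd, hall⟩
        refine ⟨⟨fun hpin => ((key p).mp (hall p hpin)).2 rfl, hnd⟩, ?_⟩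
        rintro q (rfl | hq)
        · exact hm
        · exact ((key q).mp (hall q hq)).1
      · rintro ⟨⟨hpn, hnd⟩, hall⟩
        exact ⟨hnd, fun q hq => (key q).mpr ⟨hall q (Or.inr hq), fun h => hpn (h ▸ hq)⟩⟩

-- strict lexicographic comparison on pairs (Python's tuple '<'), as sorted2 uses it
def ltp (a b : Int × Int) : Bool :=
  decide (a.1 < b.1) || (!decide (b.1 < a.1) && decide (a.2 < b.2))

theorem ltp_asymm {a b : Int × Int} (h : ltp a b = true) : ltp b a = false := by
  obtain ⟨a1, a2⟩ := a; obtain ⟨b1, b2⟩ := b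
  simp [ltp] at h ⊢; omega

theorem ltp_trans {a b c : Int × Int} (h1 : ltp a b = true) (h2 : ltp b c = true) :
    ltp a c = true := by
  obtain ⟨a1, a2⟩ := a; obtain ⟨b1, b2⟩ := b; obtain ⟨c1, c2⟩ := c
  simp [ltp] at h1 h2 ⊢; omega

theorem ltp_antisymm {a b : Int × Int} (h1 : ltp a b = false) (h2 : ltp b a = false) :
    a = b := by
  obtain ⟨a1, a2⟩ := a; obtain ⟨b1, b2⟩ := b
  simp [ltp] at h1 h2
  have : a1 = b1 ∧ a2 = b2 := by omega
  simp [this.1, this.2]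

-- inserting into a list sorted by ltp keeps it sorted
theorem pairwise_insertBy (x : Int × Int) (ys : List (Int × Int))
    (h : ys.Pairwise (fun a b => ltp b a = false)) :
    (PySem.List.insertBy ltp x ys).Pairwise (fun a b => ltp b a = false) := by
  induction ys with
  | nil => simp [PySem.List.insertBy]
  | cons y ys ih =>
    rw [List.pairwise_cons] at h
    obtain ⟨hy, hys⟩ := h
    rw [PySem.List.insertBy]
    by_cases hxy : ltp x y = true
    · simp only [hxy, if_true]
      refine List.pairwise_cons.mpr ⟨?_, List.pairwise_cons.mpr ⟨hy, hys⟩⟩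
      intro z hz
      rcases List.mem_cons.mp hz with rfl | hz'
      · exact ltp_asymm hxy
      · by_contra hzx
        have hzx' : ltp z x = true := by
          cases hzxv : ltp z x
          · exact absurd hzxv hzx
          · rfl
        exact absurd (hy z hz') (by simp [ltp_trans hzx' hxy])
    · have hxy' : ltp x y = false := by
        cases hv : ltp x y
        · rfl
        · exact absurd hv hxy
      simp only [hxy, Bool.false_eq_true, if_false]
      refine List.pairwise_cons.mpr ⟨?_, ih hys⟩
      intro z hz
      rcases (PySem.List.mem_insertBy ltp x z ys).mp hz with rfl | hz'
      · exact hxy'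
      · exact hy z hz'

theorem pairwise_foldl_insertBy (xs : List (Int × Int)) (acc : List (Int × Int))
    (hacc : acc.Pairwise (fun a b => ltp b a = false)) :
    (xs.foldl (fun acc x => PySem.List.insertBy ltp x acc) acc).Pairwise
      (fun a b => ltp b a = false) := by
  induction xs generalizing acc with
  | nil => simpa using hacc
  | cons x xs ih => exact ih _ (pairwise_insertBy x acc hacc)

theorem sorted2_pairwise_ltp (ps : List (Int × Int)) :
    (PySem.List.sorted2 ps (fun p => p.1) (fun p => p.2) false).Pairwise
      (fun a b => ltp b a = false) := by
  have : PySem.List.sorted2 ps (fun p => p.1) (fun p => p.2) false =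
      ps.foldl (fun acc x => PySem.List.insertBy ltp x acc) [] := rfl
  rw [this]
  exact pairwise_foldl_insertBy ps [] (by simp)

-- on a list sorted by ltp, "no two consecutive elements equal" is exactly Nodup
theorem allzip_iff_nodup (l : List (Int × Int))
    (h : l.Pairwise (fun a b => ltp b a = false)) :
    ((l.zip l.tail).all (fun pq => pq.1 != pq.2) = true) ↔ l.Nodup := by
  induction l with
  | nil => simp
  | cons a t ih =>
    cases t with
    | nil => simp
    | cons b t' =>
      rw [List.pairwise_cons] at h
      obtain ⟨ha, ht⟩ := h
      have hrest := ih ht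
      simp only [List.tail_cons, List.zip_cons_cons, List.all_cons, Bool.and_eq_true,
        bne_iff_ne, ne_eq, List.nodup_cons] at hrest ⊢
      constructor
      · rintro ⟨hab, hr⟩
        have hnd := hrest.mp hr
        refine ⟨?_, hnd⟩
        intro hmem
        rcases List.mem_cons.mp hmem with rfl | hmem'
        · exact hab rfl
        · have h1 : ltp b a = false := ha b (by simp)
          have h2 : ltp a b = false := by
            rw [List.pairwise_cons] at ht
            exact ht.1 a hmem'
          exact hab (ltp_antisymm h2 h1)
      · rintro ⟨hnotin, hnd⟩
        exact ⟨fun hab => hnotin (hab ▸ List.mem_cons_self), hrest.mpr hnd⟩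

-- ===== VERDICT (by name: the statement is the Claim_ definition above) =====
theorem noDuplicates_spec : Claim_equal_noDuplicates := by
  intro seq _
  unfold Spec_noDuplicates noDuplicates noDuplicates_alt
  simp only [PySem.List.slice_from_one]
  rw [go_eq_pairsLoop, map_range_eq_zip]
  set pairs := seq.zip seq.tail with hp
  set sp := PySem.List.sorted2 pairs (fun p => p.1) (fun p => p.2) false with hsp
  have hperm : sp.Perm pairs := PySem.List.sorted2_perm pairs _ _ false
  have hA : pairsLoop pairs PySem.Set.empty = true ↔ pairs.Nodup := by
    rw [pairsLoop_iff]
    simp [PySem.Set.empty]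
  have hB : ((sp.zip sp.tail).all (fun pq => pq.1 != pq.2) = true) ↔ pairs.Nodup := by
    rw [allzip_iff_nodup sp (sorted2_pairwise_ltp pairs)]
    exact hperm.nodup_iff
  rw [Bool.eq_iff_iff]
  exact hA.trans hB.symm
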